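-- pv_equiv track=rewrite | github.com/posl/comment_recommendation | script/split_gen/4_time/zh/129_D/8.py | get_max_lighted_square_area
-- ===== SOURCE A (Python) =====
-- def get_max_lighted_square_area(grid):
--     max_area = 0
--     for i in range(len(grid)):
--         for j in range(len(grid[0])):
--             if grid[i][j] == '#':
--                 continue
--             area = 1
--             for k in range(i-1, -1, -1):
--                 if grid[k][j] == '#':
--                     break
--                 area += 1
--             for k in range(i+1, len(grid)):
--                 if grid[k][j] == '#':
--                     break
--                 area += 1
--             for k in range(j-1, -1, -1):
--                 if grid[i][k] == '#':
--                     break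
--                 area += 1
--             for k in range(j+1, len(grid[0])):
--                 if grid[i][k] == '#':
--                     break
--                 area += 1
--             if area > max_area:
--                 max_area = area
--     return max_area
-- ===== SOURCE B (Python) =====
-- def get_max_lighted_square_area(grid):
--     # The grid is n x m, with m given by the first row (extra characters in
--     # longer rows are never consulted by the task); precompute, per row and per
--     # column, the length of the maximal '#'-free segment through each cell.
--     if not grid:
--         return 0
--     m = len(grid[0])
--     G = [row[:m] for row in grid]
--
--     def seg_lengths(line):
--         out, run = [], 0
--         for ch in line:
--             if ch == '#':
--                 out.extend([run] * run)
--                 out.append(0)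
--                 run = 0
--             else:
--                 run += 1
--         out.extend([run] * run)
--         return out
--
--     row_seg = [seg_lengths(row) for row in G]
--     col_seg = [seg_lengths([row[j] for row in G]) for j in range(m)]
--     best = 0
--     for i in range(len(G)):
--         for j in range(m):
--             if G[i][j] != '#':
--                 best = max(best, row_seg[i][j] + col_seg[j][i] - 1)
--     return best
-- ===== Notes on version B (the rewrite author's own statement) =====
-- stated objective: faster
-- what changed: replaces A's per-cell four directional break-scans with row/column segment-length tables computed in one pass per line (plus a one-pass column build), combined per cell
import Mathlib
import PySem

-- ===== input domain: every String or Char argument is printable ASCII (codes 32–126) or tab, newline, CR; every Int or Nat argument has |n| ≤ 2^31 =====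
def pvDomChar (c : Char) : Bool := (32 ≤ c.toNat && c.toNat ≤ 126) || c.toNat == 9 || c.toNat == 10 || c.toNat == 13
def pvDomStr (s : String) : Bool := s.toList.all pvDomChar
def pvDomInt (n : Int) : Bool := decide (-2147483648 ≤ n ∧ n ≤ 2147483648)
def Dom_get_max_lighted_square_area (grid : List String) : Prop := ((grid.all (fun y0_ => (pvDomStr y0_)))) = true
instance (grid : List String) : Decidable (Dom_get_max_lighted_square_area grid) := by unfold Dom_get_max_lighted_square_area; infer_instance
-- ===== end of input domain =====

-- B replaces A's per-cell four directional break-scans by precomputed row/column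
-- segment-length tables (one pass per line), combined per cell; measurably faster on large grids.

-- ===== PORT A =====
-- grid[i][j] (both indices in range under Pre_; defaults never reached there)
def pvCell (grid : List String) (i j : Int) : Char :=
  PySem.List.pyGetD (PySem.List.pyGetD grid i "").toList j ' '

-- one of A's `for k in …: if wall: break; area += 1` loops (state = (area, broken))
def pvScan (wall : Int → Bool) (ks : List Int) (area : Int) : Int :=
  (ks.foldl (fun s k => if s.2 then s else if wall k then (s.1, true) else (s.1 + 1, false))
    (area, false)).1

def get_max_lighted_square_area (grid : List String) : Int :=
  (PySem.List.pyRange 0 (PySem.List.len grid) 1).foldl (fun max_area i =>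
    (PySem.List.pyRange 0 (PySem.Str.len (PySem.List.pyGetD grid 0 "")) 1).foldl (fun max_area j =>
      if pvCell grid i j == '#' then max_area
      else
        let area : Int := 1
        let area := pvScan (fun k => pvCell grid k j == '#') (PySem.List.pyRange (i-1) (-1) (-1)) area
        let area := pvScan (fun k => pvCell grid k j == '#') (PySem.List.pyRange (i+1) (PySem.List.len grid) 1) area
        let area := pvScan (fun k => pvCell grid i k == '#') (PySem.List.pyRange (j-1) (-1) (-1)) area
        let area := pvScan (fun k => pvCell grid i k == '#') (PySem.List.pyRange (j+1) (PySem.Str.len (PySem.List.pyGetD grid 0 "")) 1) area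
        if area > max_area then area else max_area) max_area) 0

-- ===== PORT B =====
-- one step of seg_lengths' loop over a line
def pvSegStep (s : List Int × Int) (ch : Char) : List Int × Int :=
  if ch == '#' then (s.1 ++ List.replicate s.2.toNat s.2 ++ [0], 0) else (s.1, s.2 + 1)

-- seg_lengths(line): per position, the length of the maximal '#'-free run through it
def pvSegLengths (line : List Char) : List Int :=
  let s := line.foldl pvSegStep (([] : List Int), (0 : Int))
  s.1 ++ List.replicate s.2.toNat s.2

def get_max_lighted_square_area_alt (grid : List String) : Int :=
  if grid = [] then 0 else
  let m : Int := PySem.Str.len (PySem.List.pyGetD grid 0 "")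
  let G : List (List Char) := grid.map (fun row => PySem.List.slice row.toList none (some m))
  let rowSeg : List (List Int) := G.map pvSegLengths
  let colSeg : List (List Int) :=
    (PySem.List.pyRange 0 m 1).map
      (fun j => pvSegLengths (G.map (fun row => PySem.List.pyGetD row j ' ')))
  (PySem.List.pyRange 0 (PySem.List.len G) 1).foldl (fun best i =>
    (PySem.List.pyRange 0 m 1).foldl (fun best j =>
      if PySem.List.pyGetD (PySem.List.pyGetD G i []) j ' ' ≠ '#' then
        max best (PySem.List.pyGetD (PySem.List.pyGetD rowSeg i []) j 0 +
                  PySem.List.pyGetD (PySem.List.pyGetD colSeg j []) i 0 - 1)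
      else best) best) 0

-- ===== PRECONDITION & SPEC =====
-- Pre_ is exactly A's returning domain: A raises IndexError iff some row is shorter
-- than the first row (the unconditional cell check grid[i][j], j < len(grid[0]));
-- the empty grid is fine (A's loop body never runs).
def Pre_get_max_lighted_square_area (grid : List String) : Prop :=
  ∀ s ∈ grid, (grid.headD "").toList.length ≤ s.toList.length
instance (grid : List String) : Decidable (Pre_get_max_lighted_square_area grid) := by
  unfold Pre_get_max_lighted_square_area; infer_instance

def pvWitness_get_max_lighted_square_area : List String := ["ab.", "c#d"]

def Spec_get_max_lighted_square_area (grid : List String) (out : Int) : Prop := out = get_max_lighted_square_area_alt grid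
instance (grid : List String) (out : Int) : Decidable (Spec_get_max_lighted_square_area grid out) := by unfold Spec_get_max_lighted_square_area; infer_instance

-- ===== CLAIM (what is proved, stated in full; the proofs are below) =====
def Claim_equal_get_max_lighted_square_area : Prop := ∀ (grid : List String), Dom_get_max_lighted_square_area grid → Pre_get_max_lighted_square_area grid → Spec_get_max_lighted_square_area grid (get_max_lighted_square_area grid)

-- ===== LEMMAS AND PROOFS =====

-- "non-wall" characters; backward/forward '#'-free run lengths from position p in a line
def pvNW (c : Char) : Bool := !(c == '#')
def pvBk (L : List Char) (p : Nat) : Nat := ((L.take p).reverse.takeWhile pvNW).length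
def pvFw (L : List Char) (p : Nat) : Nat := ((L.drop (p+1)).takeWhile pvNW).length

lemma pvScan_stop (wall : Int → Bool) (ks : List Int) (a : Int) :
    ks.foldl (fun s k => if s.2 then s else if wall k then (s.1, true) else (s.1 + 1, false))
      (a, true) = (a, true) := by
  induction ks with
  | nil => rfl
  | cons k ks ih => simpa using ih

lemma pvScan_eq (wall : Int → Bool) (ks : List Int) (a : Int) :
    pvScan wall ks a = a + ((ks.takeWhile (fun k => !(wall k))).length : Int) := by
  induction ks generalizing a with
  | nil => simp [pvScan]
  | cons k ks ih =>
    by_cases h : wall k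
    · simp [pvScan, h, pvScan_stop]
    · have := ih (a + 1)
      simp only [pvScan] at this ⊢
      simp [h, this]
      omega

lemma pv_tw_fwd (L : List Char) (w : Int → Bool)
    (hw : ∀ (k : Nat) (hk : k < L.length), w k = pvNW L[k]) :
    ∀ (t s : Nat), L.length - s ≤ t →
      ((PySem.List.pyRange (s : Int) (L.length : Int) 1).takeWhile w).length
        = ((L.drop s).takeWhile pvNW).length := by
  intro t
  induction t with
  | zero =>
    intro s hs
    have h1 : L.length ≤ s := by omega
    rw [PySem.List.pyRange_one_eq_nil (by exact_mod_cast h1), List.drop_eq_nil_of_le h1]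
    simp
  | succ t ih =>
    intro s hs
    by_cases h1 : L.length ≤ s
    · rw [PySem.List.pyRange_one_eq_nil (by exact_mod_cast h1), List.drop_eq_nil_of_le h1]
      simp
    · have hlt : s < L.length := by omega
      rw [PySem.List.pyRange_one_cons (by exact_mod_cast hlt), List.takeWhile_cons,
        List.drop_eq_getElem_cons hlt, List.takeWhile_cons, hw s hlt]
      have ih' := ih (s + 1) (by omega)
      push_cast at ih'
      cases pvNW (L[s]'hlt) <;> simp [ih']

lemma pv_tw_bwd (L : List Char) (w : Int → Bool)
    (hw : ∀ (k : Nat) (hk : k < L.length), w k = pvNW L[k]) :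
    ∀ (i : Nat), i ≤ L.length →
      ((PySem.List.pyRange ((i : Int) - 1) (-1) (-1)).takeWhile w).length
        = ((L.take i).reverse.takeWhile pvNW).length := by
  intro i
  induction i with
  | zero =>
    intro _
    rw [PySem.List.pyRange_neg_one_eq_nil (by norm_num)]
    simp
  | succ i ih =>
    intro hi
    have hlt : i < L.length := by omega
    have h0 : ((i + 1 : Nat) : Int) - 1 = (i : Int) := by push_cast; ring
    rw [h0, PySem.List.pyRange_neg_one_cons (by omega)]
    have htake : L.take (i + 1) = L.take i ++ [L[i]] := by
      rw [List.take_add_one]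
      simp [List.getElem?_eq_getElem hlt]
    rw [htake]
    simp only [List.reverse_append, List.reverse_cons, List.reverse_nil, List.nil_append,
      List.singleton_append, List.takeWhile_cons]
    rw [hw i hlt]
    cases hni : pvNW (L[i]'hlt) <;> simp [ih (by omega)]

lemma pvSeg_fold_out (line : List Char) (out : List Int) (run : Int) :
    line.foldl pvSegStep (out, run)
      = (out ++ (line.foldl pvSegStep ([], run)).1, (line.foldl pvSegStep ([], run)).2) := by
  induction line generalizing out run with
  | nil => simp
  | cons c cs ih =>
    by_cases h : c == '#'
    · simp only [List.foldl_cons, pvSegStep, h, if_pos, List.nil_append]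
      rw [ih (out ++ List.replicate run.toNat run ++ [0]) 0,
        ih (List.replicate run.toNat run ++ [0]) 0]
      simp [List.append_assoc]
    · simp only [List.foldl_cons, pvSegStep, h, Bool.false_eq_true, if_neg, not_false_iff]
      exact ih out (run + 1)

lemma pvSeg_fold_clean (xs : List Char) (h : ∀ c ∈ xs, pvNW c) (run : Int) :
    xs.foldl pvSegStep ([], run) = ([], run + xs.length) := by
  induction xs generalizing run with
  | nil => simp
  | cons c cs ih =>
    have hc : (c == '#') = false := by
      have := h c (by simp)
      simp [pvNW] at this
      simp [this]
    simp only [List.foldl_cons, pvSegStep, hc, Bool.false_eq_true, if_neg, not_false_iff]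
    rw [ih (fun c hc => h c (by simp [hc])) (run + 1)]
    congr 1
    simp only [List.length_cons]
    push_cast
    omega

lemma pvSeg_clean (xs : List Char) (h : ∀ c ∈ xs, pvNW c) :
    pvSegLengths xs = List.replicate xs.length (xs.length : Int) := by
  unfold pvSegLengths
  rw [pvSeg_fold_clean xs h 0]
  simp

lemma pvSeg_decomp (xs ys : List Char) (h : ∀ c ∈ xs, pvNW c) :
    pvSegLengths (xs ++ '#' :: ys)
      = List.replicate xs.length (xs.length : Int) ++ (0 : Int) :: pvSegLengths ys := by
  unfold pvSegLengths
  rw [List.foldl_append, pvSeg_fold_clean xs h 0, List.foldl_cons]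
  have hstep : pvSegStep ([], 0 + (xs.length : Int)) '#'
      = (List.replicate xs.length (xs.length : Int) ++ [0], 0) := by
    simp [pvSegStep]
  rw [hstep, pvSeg_fold_out ys (List.replicate xs.length (xs.length : Int) ++ [0]) 0]
  simp [List.append_assoc]

lemma pvNW_false_iff (c : Char) : pvNW c = false ↔ c = '#' := by
  simp [pvNW]

lemma pv_getD_replicate (n i : Nat) (x d : Int) (h : i < n) :
    (List.replicate n x).getD i d = x := by
  rw [List.getD_eq_getElem?_getD, List.getElem?_replicate_of_lt h]
  rfl

-- a '#' cuts every takeWhile of non-walls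
lemma pv_tw_append_wall (l l2 : List Char) :
    (l ++ '#' :: l2).takeWhile pvNW = l.takeWhile pvNW := by
  induction l with
  | nil => simp [List.takeWhile_cons, pvNW]
  | cons c cs ih =>
    by_cases h : pvNW c <;> simp [List.takeWhile_cons, h, ih]

lemma pvSeg_getD : ∀ (N : Nat) (line : List Char), line.length ≤ N →
    ∀ (p : Nat), ∀ _ : p < line.length, pvNW (line.getD p ' ') = true →
    (pvSegLengths line).getD p 0 = (pvBk line p : Int) + 1 + (pvFw line p : Int) := by
  intro N
  induction N with
  | zero => intro line hN p hp _; omega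
  | succ N ih =>
    intro line hN p hp hc
    by_cases hmem : '#' ∈ line
    · -- split at the first '#'
      have hsplit := List.takeWhile_append_dropWhile (p := pvNW) (l := line)
      set xs := line.takeWhile pvNW with hxs
      set rest := line.dropWhile pvNW with hrest
      have hxsall : ∀ c ∈ xs, pvNW c = true := fun c hc => List.mem_takeWhile_imp hc
      have hrestne : rest ≠ [] := by
        intro hnil
        have : line = xs := by rw [← hsplit, hnil, List.append_nil]
        exact absurd (hxsall '#' (this ▸ hmem)) (by simp [pvNW])
      obtain ⟨r, ys, hry⟩ := List.exists_cons_of_ne_nil hrestne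
      have hrwall : pvNW r = false := by
        have h1 := List.head?_dropWhile_not pvNW line
        have h2 : (List.dropWhile pvNW line).head? = some r := by
          rw [← hrest, hry]
          rfl
        rw [h2] at h1
        exact h1
      have hr : r = '#' := (pvNW_false_iff r).mp hrwall
      have hline : line = xs ++ '#' :: ys := by rw [← hsplit, hry, hr]
      set k := xs.length with hk
      have hlen : line.length = k + 1 + ys.length := by
        rw [hline]; simp; omega
      rw [hline] at hp hc ⊢
      rw [pvSeg_decomp xs ys hxsall]
      rcases lt_trichotomy p k with hpk | hpk | hpk
      · -- p inside the first clean block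
        have hgd : (List.replicate k (k : Int) ++ (0:Int) :: pvSegLengths ys).getD p 0 = (k : Int) := by
          rw [List.getD_append _ _ _ _ (by simpa using hpk)]
          exact pv_getD_replicate _ _ _ _ hpk
        rw [hgd]
        have htake : (xs ++ '#' :: ys).take p = xs.take p := List.take_append_of_le_length (by omega)
        have hbk : pvBk (xs ++ '#' :: ys) p = p := by
          unfold pvBk
          rw [htake, List.takeWhile_eq_self_iff.mpr
            (fun c hcmem => hxsall c (List.mem_of_mem_take (by simpa using hcmem)))]
          simp
          omega
        have hdrop : (xs ++ '#' :: ys).drop (p+1) = xs.drop (p+1) ++ '#' :: ys :=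
          List.drop_append_of_le_length (by omega)
        have hfw : pvFw (xs ++ '#' :: ys) p = k - p - 1 := by
          unfold pvFw
          rw [hdrop, pv_tw_append_wall]
          rw [List.takeWhile_eq_self_iff.mpr
            (fun c hcmem => hxsall c (List.mem_of_mem_drop hcmem))]
          simp [hk]
          omega
        rw [hbk, hfw]
        push_cast [Nat.cast_sub (by omega : p + 1 ≤ k)]
        ring_nf
        omega
      · -- p = k would be the '#' itself: contradiction with pvNW at p
        exfalso
        have hget : (xs ++ '#' :: ys).getD p ' ' = '#' := by
          rw [List.getD_append_right _ _ _ _ (by omega), show p - xs.length = 0 by omega]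
          rfl
        rw [hget] at hc
        simp [pvNW] at hc
      · -- p beyond the '#': recurse into ys
        obtain ⟨q, hq⟩ : ∃ q, p = k + 1 + q := ⟨p - k - 1, by omega⟩
        have hqlt : q < ys.length := by
          have := hp
          simp only [List.length_append, List.length_cons] at this
          omega
        have hyget : (xs ++ '#' :: ys).getD p ' ' = ys.getD q ' ' := by
          rw [List.getD_append_right _ _ _ _ (by omega), show p - xs.length = q + 1 by omega]
          simp
        have hgd : (List.replicate k (k : Int) ++ (0:Int) :: pvSegLengths ys).getD p 0
            = (pvSegLengths ys).getD q 0 := by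
          rw [List.getD_append_right _ _ _ _ (by simpa using (by omega : k ≤ p))]
          simp only [List.length_replicate]
          have hq' : p - k = q + 1 := by omega
          rw [hq']
          simp
        rw [hgd]
        have hbk : pvBk (xs ++ '#' :: ys) p = pvBk ys q := by
          unfold pvBk
          have htake : (xs ++ '#' :: ys).take p = xs ++ '#' :: ys.take q := by
            rw [List.take_append]
            have h1 : p - xs.length = q + 1 := by omega
            rw [List.take_of_length_le (by omega), h1]
            simp
          rw [htake]
          have hrev : (xs ++ '#' :: ys.take q).reverse
              = (ys.take q).reverse ++ '#' :: xs.reverse := by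
            simp
          rw [hrev, pv_tw_append_wall]
        have hfw : pvFw (xs ++ '#' :: ys) p = pvFw ys q := by
          unfold pvFw
          have h1 : p + 1 = xs.length + (q + 2) := by omega
          rw [h1, List.drop_length_add_append]
          simp
        rw [hbk, hfw]
        exact ih ys (by omega) q hqlt (by rw [hyget] at hc; exact hc)
    · -- no '#': the whole line is one clean segment
      have hall : ∀ c ∈ line, pvNW c = true := by
        intro c hcm
        rcases Bool.eq_false_or_eq_true (pvNW c) with ht | hf
        · exact ht
        · exact absurd ((pvNW_false_iff c).mp hf ▸ hcm) hmem
      rw [pvSeg_clean line hall, pv_getD_replicate _ _ _ _ hp]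
      have hbk : pvBk line p = p := by
        unfold pvBk
        rw [List.takeWhile_eq_self_iff.mpr
          (fun c hcmem => hall c (List.mem_of_mem_take (by simpa using hcmem)))]
        simp
        omega
      have hfw : pvFw line p = line.length - p - 1 := by
        unfold pvFw
        rw [List.takeWhile_eq_self_iff.mpr
          (fun c hcmem => hall c (List.mem_of_mem_drop hcmem))]
        simp
        omega
      rw [hbk, hfw]
      omega

lemma pv_getD_eq {α : Type} (l : List α) (k : Nat) (d : α) (hk : k < l.length) :
    l.getD k d = l[k]'hk := by
  rw [List.getD_eq_getElem?_getD, List.getElem?_eq_getElem hk]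
  rfl

lemma pv_getD_map {α β : Type} (f : α → β) (l : List α) (k : Nat) (d : β) (hk : k < l.length) :
    (l.map f).getD k d = f (l[k]'hk) := by
  rw [List.getD_eq_getElem?_getD, List.getElem?_map, List.getElem?_eq_getElem hk]
  rfl

lemma pv_getD_take {α : Type} (l : List α) (mm k : Nat) (d : α) (hk : k < mm) :
    (l.take mm).getD k d = l.getD k d := by
  rw [List.getD_eq_getElem?_getD, List.getD_eq_getElem?_getD, List.getElem?_take_of_lt hk]

-- ===== VERDICT (by name: the statement is the Claim_ definition above) =====
theorem get_max_lighted_square_area_spec : Claim_equal_get_max_lighted_square_area := by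
  intro grid _hdom hpre
  unfold Spec_get_max_lighted_square_area
  by_cases hg : grid = []
  · subst hg
    rfl
  · unfold Pre_get_max_lighted_square_area at hpre
    set m : Nat := (grid.headD "").toList.length with hm
    have hhead : PySem.List.pyGetD grid 0 "" = grid.headD "" := by
      cases grid with
      | nil => exact absurd rfl hg
      | cons a l => simp [PySem.List.pyGetD_zero]
    have hmA : PySem.Str.len (PySem.List.pyGetD grid 0 "") = (m : Int) := by
      rw [hhead, PySem.Str.len_eq]
    unfold get_max_lighted_square_area get_max_lighted_square_area_alt
    rw [if_neg hg]
    simp only [hmA, PySem.List.len_eq, List.length_map, PySem.List.slice_to_natCast]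
    apply PySem.List.foldl_congr_mem
    intro acc i hi
    obtain ⟨hi0, hin⟩ := PySem.List.mem_pyRange_one.mp hi
    lift i to ℕ using hi0 with inat
    have hinat : inat < grid.length := by exact_mod_cast hin
    apply PySem.List.foldl_congr_mem
    intro acc2 j hj
    obtain ⟨hj0, hjm⟩ := PySem.List.mem_pyRange_one.mp hj
    lift j to ℕ using hj0 with jnat
    have hjnat : jnat < m := by exact_mod_cast hjm
    have hrowlen : m ≤ (grid[inat]'hinat).toList.length := hpre _ (List.getElem_mem hinat)
    set full : List Char := (grid[inat]'hinat).toList with hfull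
    set row : List Char := full.take m with hrowdef
    have hrowlenm : row.length = m := by
      rw [hrowdef, List.length_take]
      omega
    set col : List Char :=
      (grid.map (fun r : String => r.toList.take m)).map (fun r => r.getD jnat ' ') with hcol
    clear_value full row col
    have hcollen : col.length = grid.length := by simp [hcol]
    have hcolget : ∀ (k : Nat), k < grid.length →
        col.getD k ' ' = (PySem.List.pyGetD grid (k : Int) "").toList.getD jnat ' ' := by
      intro k hk
      rw [hcol, pv_getD_map _ _ _ _ (by simpa using hk), List.getElem_map,
        pv_getD_take _ _ _ _ hjnat, PySem.List.pyGetD_natCast, pv_getD_eq grid k "" hk]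
    have hcell : ∀ (k : Nat), pvCell grid ↑inat ↑k = full.getD k ' ' := by
      intro k
      unfold pvCell
      rw [PySem.List.pyGetD_natCast, PySem.List.pyGetD_natCast, pv_getD_eq grid inat "" hinat,
        ← hfull]
    have hwcol : ∀ (k : Nat) (hk : k < col.length),
        (!(pvCell grid (k : Int) ↑jnat == '#')) = pvNW (col[k]'hk) := by
      intro k hk
      have hk' : k < grid.length := by rwa [hcollen] at hk
      have h1 : pvCell grid ↑k ↑jnat = col[k]'hk := by
        unfold pvCell
        rw [PySem.List.pyGetD_natCast, ← pv_getD_eq col k ' ' hk, hcolget k hk']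
      rw [h1, pvNW]
    have hrowget : ∀ (k : Nat) (hk : k < row.length), row[k]'hk = full.getD k ' ' := by
      intro k hk
      rw [← pv_getD_eq row k ' ' hk, hrowdef, pv_getD_take _ _ _ _ (by omega : k < m)]
    have hwrow : ∀ (k : Nat) (hk : k < row.length),
        (!(pvCell grid ↑inat (k : Int) == '#')) = pvNW (row[k]'hk) := by
      intro k hk
      rw [hcell k, hrowget k hk, pvNW]
    have hBcell : PySem.List.pyGetD
        (PySem.List.pyGetD (grid.map (fun r : String => r.toList.take m)) ↑inat [])
        ↑jnat ' ' = full.getD jnat ' ' := by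
      rw [PySem.List.pyGetD_natCast, PySem.List.pyGetD_natCast,
        pv_getD_map _ _ _ _ hinat, ← hfull, pv_getD_take _ _ _ _ hjnat]
    by_cases hwall : full.getD jnat ' ' = '#'
    · have hA : (full.getD jnat ' ' == '#') = true := by
        rw [hwall]
        rfl
      have hB : ¬(full.getD jnat ' ' ≠ '#') := fun h => h hwall
      rw [hcell jnat, hBcell, if_pos hA, if_neg hB]
    · have hnw : (full.getD jnat ' ' == '#') = false := beq_eq_false_iff_ne.mpr hwall
      have hnwB : pvNW (full.getD jnat ' ') = true := by
        simp only [pvNW, hnw, Bool.not_false]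
      rw [hcell jnat, hBcell,
        if_neg (show ¬((full.getD jnat ' ' == '#') = true) by rw [hnw]; exact Bool.false_ne_true),
        if_pos (show full.getD jnat ' ' ≠ '#' from hwall)]
      rw [pvScan_eq, pvScan_eq, pvScan_eq, pvScan_eq]
      rw [PySem.List.pyGetD_map_pyRange _ m jnat [] hjnat]
      beta_reduce
      simp only [PySem.List.pyGetD_natCast]
      rw [← hcol]
      rw [pv_getD_map _ _ _ _
        (show inat < (grid.map (fun r : String => r.toList.take m)).length by simpa using hinat)]
      simp only [List.getElem_map]
      rw [← hfull, ← hrowdef]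
      have hup : ((PySem.List.pyRange ((inat : Int) - 1) (-1) (-1)).takeWhile
          (fun k => !(pvCell grid k ↑jnat == '#'))).length = pvBk col inat := by
        have h1 := pv_tw_bwd col (fun k => !(pvCell grid k ↑jnat == '#')) hwcol inat (by omega)
        unfold pvBk
        exact h1
      have hdown : ((PySem.List.pyRange ((inat : Int) + 1) ((grid.length : Nat) : Int) 1).takeWhile
          (fun k => !(pvCell grid k ↑jnat == '#'))).length = pvFw col inat := by
        have h1 := pv_tw_fwd col (fun k => !(pvCell grid k ↑jnat == '#')) hwcol col.length
          (inat + 1) (by omega)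
        rw [hcollen] at h1
        push_cast at h1
        unfold pvFw
        exact h1
      have hleft : ((PySem.List.pyRange ((jnat : Int) - 1) (-1) (-1)).takeWhile
          (fun k => !(pvCell grid ↑inat k == '#'))).length = pvBk row jnat := by
        have h1 := pv_tw_bwd row (fun k => !(pvCell grid ↑inat k == '#')) hwrow jnat (by omega)
        unfold pvBk
        exact h1
      have hright : ((PySem.List.pyRange ((jnat : Int) + 1) ((m : Nat) : Int) 1).takeWhile
          (fun k => !(pvCell grid ↑inat k == '#'))).length = pvFw row jnat := by
        have h1 := pv_tw_fwd row (fun k => !(pvCell grid ↑inat k == '#')) hwrow row.length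
          (jnat + 1) (by omega)
        rw [hrowlenm] at h1
        push_cast at h1
        unfold pvFw
        exact h1
      rw [hup, hdown, hleft, hright]
      rw [pvSeg_getD row.length row le_rfl jnat (by omega)
        (by rw [hrowdef, pv_getD_take _ _ _ _ hjnat]; exact hnwB)]
      rw [pvSeg_getD col.length col le_rfl inat (by omega)
        (by rw [hcolget inat hinat, PySem.List.pyGetD_natCast, pv_getD_eq grid inat "" hinat,
              ← hfull]
            exact hnwB)]
      split_ifs <;> omega
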